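-- pv_equiv track=rewrite | github.com/vpoonia/python_practice | optimum_route.py | simple_main
-- ===== SOURCE A (Python) =====
-- def simple_main(max_distance, forwards_routes, backward_routes):
-- 	forwards_routes = [item for item in forwards_routes if item[1]<=max_distance]
-- 	if not forwards_routes:
-- 		return []
-- 	forwards_routes.sort(key=lambda x: x[1])
-- 	possible_combs = []
-- 	for item in forwards_routes:
-- 		temp_list = [backward_item for backward_item in backward_routes if backward_item[1]+item[1]<=max_distance]
-- 		if not temp_list:
-- 			break
-- 		possible_combs.extend([[item[0], backward_item[0],max_distance-item[1]-backward_item[1]]for backward_item in temp_list])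
-- 	possible_combs.sort(key=lambda x: x[2])
-- 	if not possible_combs:
-- 		return []
-- 	return [[item[0],item[1]] for item in possible_combs if item[2]==possible_combs[0][2]]
-- ===== SOURCE B (Python) =====
-- def simple_main(max_distance, forwards_routes, backward_routes):
--     # single pass: find the largest achievable f[1]+b[1] <= max_distance
--     best = None
--     for f in forwards_routes:
--         if f[1] <= max_distance:
--             for b in backward_routes:
--                 s = f[1] + b[1]
--                 if s <= max_distance and (best is None or s > best):
--                     best = s
--     if best is None:
--         return []
--     # only the winning forwards need sorting; match backwards via a distance set
--     bvals = {b[1] for b in backward_routes}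
--     winners = [f for f in forwards_routes
--                if f[1] <= max_distance and best - f[1] in bvals]
--     winners.sort(key=lambda x: x[1])
--     return [[f[0], b[0]] for f in winners
--             for b in backward_routes if f[1] + b[1] == best]
-- ===== Notes on version B (the rewrite author's own statement) =====
-- stated objective: faster
-- what changed: Instead of building every admissible forward/backward combination and sorting that whole list by leftover distance, B finds the maximal admissible pair sum in one pass, then sorts only the winning forwards (selected via a set of backward distances) and emits the matching pairs in order.
import Mathlib
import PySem

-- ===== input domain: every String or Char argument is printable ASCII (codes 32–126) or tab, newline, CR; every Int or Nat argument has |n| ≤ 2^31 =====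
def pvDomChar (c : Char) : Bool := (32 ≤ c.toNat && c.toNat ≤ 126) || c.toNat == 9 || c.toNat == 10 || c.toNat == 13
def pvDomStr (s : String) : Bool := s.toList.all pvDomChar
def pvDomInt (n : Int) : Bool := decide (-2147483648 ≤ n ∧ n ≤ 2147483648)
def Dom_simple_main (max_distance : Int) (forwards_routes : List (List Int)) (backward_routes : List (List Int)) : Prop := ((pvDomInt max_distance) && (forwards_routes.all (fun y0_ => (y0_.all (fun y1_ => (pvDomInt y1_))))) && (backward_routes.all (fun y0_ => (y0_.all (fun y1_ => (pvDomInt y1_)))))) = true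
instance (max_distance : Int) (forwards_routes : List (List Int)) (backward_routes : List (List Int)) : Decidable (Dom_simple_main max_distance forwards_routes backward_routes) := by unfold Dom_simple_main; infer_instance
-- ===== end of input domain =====

-- B replaces A's build-all-combinations-then-sort with a single max-distance pass plus a
-- backward-distance set, sorting only the winning forwards (objective: faster on large inputs).


-- ===== PORT A =====
-- route[0] / route[1] are ported as getD 0 0 / getD 1 0: exact under Pre_ (every accessed route
-- has length ≥ 2); the combination triples are built by the code itself with length 3.
-- the 'for item in forwards_routes: … break' loop, with its accumulator possible_combs:
def pvLoopA (max_distance : Int) (backward_routes : List (List Int)) :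
    List (List Int) → List (List Int) → List (List Int)
  | [], acc => acc
  | item :: rest, acc =>
    let temp_list := backward_routes.filter
      (fun b => decide (b.getD 1 0 + item.getD 1 0 ≤ max_distance))
    if temp_list = [] then acc
    else pvLoopA max_distance backward_routes rest
      (acc ++ temp_list.map (fun b =>
        [item.getD 0 0, b.getD 0 0, max_distance - item.getD 1 0 - b.getD 1 0]))

def simple_main (max_distance : Int) (forwards_routes : List (List Int)) (backward_routes : List (List Int)) : List (List Int) :=
  let fwd := forwards_routes.filter (fun item => decide (item.getD 1 0 ≤ max_distance))
  if fwd = [] then []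
  else
    let fwds := PySem.List.sorted fwd (fun x => x.getD 1 0) false
    let possible_combs := PySem.List.sorted (pvLoopA max_distance backward_routes fwds []) (fun x => x.getD 2 0) false
    if possible_combs = [] then []
    else
      (possible_combs.filter (fun item => decide (item.getD 2 0 = (possible_combs.headD []).getD 2 0))).map
        (fun item => [item.getD 0 0, item.getD 1 0])

-- ===== PORT B =====
def simple_main_alt (max_distance : Int) (forwards_routes : List (List Int)) (backward_routes : List (List Int)) : List (List Int) :=
  -- single pass: largest achievable f[1]+b[1] ≤ max_distance (None → no valid pair)
  let best : Option Int := forwards_routes.foldl (fun acc f =>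
    if f.getD 1 0 ≤ max_distance then
      backward_routes.foldl (fun acc2 b =>
        let s := f.getD 1 0 + b.getD 1 0
        if s ≤ max_distance then
          match acc2 with
          | none => some s
          | some v => if v < s then some s else acc2
        else acc2) acc
    else acc) none
  match best with
  | none => []
  | some v =>
    let bvals : PySem.Set Int := PySem.Set.ofList (backward_routes.map (fun b => b.getD 1 0))
    let winners := PySem.List.sorted
      (forwards_routes.filter (fun f =>
        decide (f.getD 1 0 ≤ max_distance) && PySem.Set.contains bvals (v - f.getD 1 0)))
      (fun x => x.getD 1 0) false
    winners.flatMap (fun f =>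
      (backward_routes.filter (fun b => decide (f.getD 1 0 + b.getD 1 0 = v))).map
        (fun b => [f.getD 0 0, b.getD 0 0]))

-- ===== PRECONDITION & SPEC =====
-- A evaluates route[1] on every forward route, and on every backward route as soon as one
-- forward route passes the distance filter; on a route shorter than 2 it raises IndexError.
-- Pre_ excludes exactly those raising inputs (it excludes no input on which A returns).
def Pre_simple_main (max_distance : Int) (forwards_routes : List (List Int)) (backward_routes : List (List Int)) : Prop :=
  (∀ r ∈ forwards_routes, 2 ≤ r.length) ∧
  ((∃ f ∈ forwards_routes, f.getD 1 0 ≤ max_distance) → ∀ r ∈ backward_routes, 2 ≤ r.length)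
instance (max_distance : Int) (forwards_routes : List (List Int)) (backward_routes : List (List Int)) : Decidable (Pre_simple_main max_distance forwards_routes backward_routes) := by unfold Pre_simple_main; infer_instance

def pvWitness_simple_main : Int × List (List Int) × List (List Int) :=
  (10, [[1, 4], [2, 6]], [[7, 5], [8, 6]])

def Spec_simple_main (max_distance : Int) (forwards_routes : List (List Int)) (backward_routes : List (List Int)) (out : List (List Int)) : Prop := out = simple_main_alt max_distance forwards_routes backward_routes
instance (max_distance : Int) (forwards_routes : List (List Int)) (backward_routes : List (List Int)) (out : List (List Int)) : Decidable (Spec_simple_main max_distance forwards_routes backward_routes out) := by unfold Spec_simple_main; infer_instance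

-- ===== CLAIM (what is proved, stated in full; the proofs are below) =====
def Claim_equal_simple_main : Prop := ∀ (max_distance : Int) (forwards_routes : List (List Int)) (backward_routes : List (List Int)), Dom_simple_main max_distance forwards_routes backward_routes → Pre_simple_main max_distance forwards_routes backward_routes → Spec_simple_main max_distance forwards_routes backward_routes (simple_main max_distance forwards_routes backward_routes)

-- ===== LEMMAS AND PROOFS =====

-- insertBy at a key below every key of the target list prepends
lemma pvInsertBy_of_lt {α : Type} (key : α → Int) (x : α) (l : List α)
    (h : ∀ z ∈ l, key x < key z) :
    PySem.List.insertBy (fun a b => decide (key a < key b)) x l = x :: l := by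
  cases l with
  | nil => rfl
  | cons y t =>
    simp [PySem.List.insertBy, h y (by simp)]

-- filtering a stable insertion commutes, provided the target list is key-sorted
lemma pvFilter_insertBy {α : Type} (key : α → Int) (q : α → Bool) (x : α) :
    ∀ (acc : List α), acc.Pairwise (fun a b => key a ≤ key b) →
    (PySem.List.insertBy (fun a b => decide (key a < key b)) x acc).filter q =
      if q x then PySem.List.insertBy (fun a b => decide (key a < key b)) x (acc.filter q)
      else acc.filter q := by
  intro acc
  induction acc with
  | nil => intro _; cases hqx : q x <;> simp [PySem.List.insertBy, hqx]
  | cons y t ih =>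
    intro hp
    rw [List.pairwise_cons] at hp
    by_cases hxy : key x < key y
    · have hall : ∀ z ∈ y :: t, key x < key z := by
        intro z hz
        rcases List.mem_cons.mp hz with rfl | hz
        · exact hxy
        · exact lt_of_lt_of_le hxy (hp.1 z hz)
      rw [pvInsertBy_of_lt key x (y :: t) hall]
      have hall2 : ∀ z ∈ (y :: t).filter q, key x < key z := by
        intro z hz; exact hall z (List.mem_of_mem_filter hz)
      cases hqx : q x
      · simp [List.filter_cons, hqx]
      · rw [pvInsertBy_of_lt key x ((y :: t).filter q) hall2]
        simp [List.filter_cons, hqx]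
    · have hstep : PySem.List.insertBy (fun a b => decide (key a < key b)) x (y :: t) =
          y :: PySem.List.insertBy (fun a b => decide (key a < key b)) x t := by
        simp [PySem.List.insertBy, hxy]
      rw [hstep]
      cases hqy : q y
      · simp only [List.filter_cons, hqy]
        exact ih hp.2
      · simp only [List.filter_cons, hqy]
        rw [ih hp.2]
        cases hqx : q x
        · simp
        · have : PySem.List.insertBy (fun a b => decide (key a < key b)) x (y :: t.filter q) =
              y :: PySem.List.insertBy (fun a b => decide (key a < key b)) x (t.filter q) := by
            simp [PySem.List.insertBy, hxy]
          simp [this]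

-- filter commutes with the stable sort
lemma pvFilter_sorted {α : Type} (key : α → Int) (q : α → Bool) (xs : List α) :
    (PySem.List.sorted xs key false).filter q = PySem.List.sorted (xs.filter q) key false := by
  induction xs using List.reverseRecOn with
  | nil => rfl
  | append_singleton xs x ih =>
    rw [PySem.List.sorted_eq_foldl_insertBy (xs ++ [x]) key, List.foldl_append]
    rw [← PySem.List.sorted_eq_foldl_insertBy xs key]
    simp only [List.foldl_cons, List.foldl_nil]
    rw [pvFilter_insertBy key q x _ (PySem.List.sorted_pairwise xs key), ih]
    rw [List.filter_append]
    cases hqx : q x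
    · simp [hqx]
    · simp only [hqx, if_true, List.filter_cons, List.filter_nil]
      rw [PySem.List.sorted_eq_foldl_insertBy (xs.filter q ++ [x]) key, List.foldl_append]
      rw [← PySem.List.sorted_eq_foldl_insertBy (xs.filter q) key]
      simp

-- the break in A's loop only skips forwards whose temp_list is empty anyway
lemma pvLoopA_eq (max_distance : Int) (B : List (List Int)) :
    ∀ (l : List (List Int)) (acc : List (List Int)),
    l.Pairwise (fun a b => a.getD 1 0 ≤ b.getD 1 0) →
    pvLoopA max_distance B l acc = acc ++ l.flatMap (fun f =>
      (B.filter (fun b => decide (b.getD 1 0 + f.getD 1 0 ≤ max_distance))).map (fun b =>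
        [f.getD 0 0, b.getD 0 0, max_distance - f.getD 1 0 - b.getD 1 0])) := by
  intro l
  induction l with
  | nil => intro acc _; simp [pvLoopA]
  | cons item rest ih =>
    intro acc hp
    rw [List.pairwise_cons] at hp
    by_cases hemp : B.filter (fun b => decide (b.getD 1 0 + item.getD 1 0 ≤ max_distance)) = []
    · have hrest : ∀ f ∈ rest,
          B.filter (fun b => decide (b.getD 1 0 + f.getD 1 0 ≤ max_distance)) = [] := by
        intro f hf
        rw [List.filter_eq_nil_iff] at hemp ⊢
        intro b hb
        have h1 := hemp b hb
        have h2 := hp.1 f hf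
        simp only [decide_eq_true_eq] at h1 ⊢
        omega
      have hnil : rest.flatMap (fun f =>
          (B.filter (fun b => decide (b.getD 1 0 + f.getD 1 0 ≤ max_distance))).map (fun b =>
            [f.getD 0 0, b.getD 0 0, max_distance - f.getD 1 0 - b.getD 1 0])) = [] := by
        rw [List.flatMap_eq_nil_iff]
        intro f hf; rw [hrest f hf]; rfl
      simp only [pvLoopA]
      rw [List.flatMap_cons, hnil, hemp]
      simp
    · simp only [pvLoopA, if_neg hemp]
      rw [ih _ hp.2, List.flatMap_cons]
      simp [List.append_assoc]

-- characterisation of B's running-max fold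
def pvStep (acc : Option Int) (s : Int) : Option Int :=
  match acc with
  | none => some s
  | some v => if v < s then some s else acc

lemma pvStep_none_iff (l : List Int) : ∀ (a : Option Int),
    l.foldl pvStep a = none ↔ a = none ∧ l = [] := by
  induction l with
  | nil => intro a; simp
  | cons x t ih =>
    intro a
    simp only [List.foldl_cons, ih]
    constructor
    · rintro ⟨h1, h2⟩
      cases a with
      | none => simp [pvStep] at h1
      | some v => simp [pvStep] at h1; split at h1 <;> simp_all
    · rintro ⟨_, h⟩; exact absurd h (by simp)

lemma pvStep_some (l : List Int) : ∀ (a : Option Int) (v : Int),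
    l.foldl pvStep a = some v →
    (a = some v ∨ v ∈ l) ∧ (∀ s ∈ l, s ≤ v) ∧ (∀ w, a = some w → w ≤ v) := by
  induction l with
  | nil => intro a v h; simp at h; simp [h]
  | cons x t ih =>
    intro a v h
    simp only [List.foldl_cons] at h
    obtain ⟨h1, h2, h3⟩ := ih (pvStep a x) v h
    refine ⟨?_, ?_, ?_⟩
    · rcases h1 with h1 | h1
      · cases a with
        | none => simp [pvStep] at h1; simp [h1]
        | some w =>
          simp only [pvStep] at h1
          split at h1
          · simp at h1; simp [h1]
          · simp [h1]
      · simp [h1]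
    · intro s hs
      rcases List.mem_cons.mp hs with rfl | hs
      · cases a with
        | none => exact h3 s rfl
        | some w =>
          by_cases hws : w < s
          · exact h3 s (by simp [pvStep, hws])
          · have := h3 w (by simp [pvStep, hws]); omega
      · exact h2 s hs
    · intro w hw
      subst hw
      cases hws : pvStep (some w) x with
      | none => simp [pvStep] at hws; split at hws <;> simp_all
      | some u =>
        have hu := h3 u hws
        simp only [pvStep] at hws
        split at hws <;> simp_all <;> omega

-- B's nested fold is the running max over the list of admissible pair sums
lemma pvBest_eq (max_distance : Int) (F B : List (List Int)) :
    (F.foldl (fun acc f =>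
      if f.getD 1 0 ≤ max_distance then
        B.foldl (fun acc2 b =>
          let s := f.getD 1 0 + b.getD 1 0
          if s ≤ max_distance then
            match acc2 with
            | none => some s
            | some v => if v < s then some s else acc2
          else acc2) acc
      else acc) none) =
    ((F.filter (fun item => decide (item.getD 1 0 ≤ max_distance))).flatMap (fun f =>
      (B.filter (fun b => decide (b.getD 1 0 + f.getD 1 0 ≤ max_distance))).map (fun b =>
        f.getD 1 0 + b.getD 1 0))).foldl pvStep none := by
  rw [List.foldl_flatMap]
  rw [List.foldl_filter]
  apply List.foldl_ext
  intro acc f _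
  by_cases hf : f.getD 1 0 ≤ max_distance
  · rw [if_pos hf, if_pos (by simpa using hf)]
    rw [List.foldl_map, List.foldl_filter]
    apply List.foldl_ext
    intro acc2 b _
    by_cases hb : b.getD 1 0 + f.getD 1 0 ≤ max_distance
    · have hb' : f.getD 1 0 + b.getD 1 0 ≤ max_distance := by omega
      rw [if_pos hb', if_pos (show (decide (b.getD 1 0 + f.getD 1 0 ≤ max_distance)) = true by
        simpa using hb)]
      cases acc2 <;> rfl
    · have hb' : ¬ f.getD 1 0 + b.getD 1 0 ≤ max_distance := by omega
      rw [if_neg hb', if_neg (show ¬ (decide (b.getD 1 0 + f.getD 1 0 ≤ max_distance)) = true by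
        simpa using hb)]
  · rw [if_neg hf, if_neg (by simpa using hf)]

-- dropping flatMap arguments that produce [] does not change the result
lemma pvFlatMap_filter {α β : Type} (q : α → Bool) (h : α → List β) :
    ∀ (l : List α), (∀ x ∈ l, q x = false → h x = []) →
    (l.filter q).flatMap h = l.flatMap h := by
  intro l
  induction l with
  | nil => intro _; rfl
  | cons x t ih =>
    intro hnil
    have iht := ih (fun y hy => hnil y (List.mem_cons_of_mem _ hy))
    cases hqx : q x
    · rw [List.filter_cons, if_neg (by simp [hqx]), iht, List.flatMap_cons,
          hnil x (by simp) hqx, List.nil_append]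
    · rw [List.filter_cons, if_pos (by simp [hqx]), List.flatMap_cons, List.flatMap_cons, iht]

theorem pv_main (md : Int) (F B : List (List Int)) :
    simple_main md F B = simple_main_alt md F B := by
  simp only [simple_main, simple_main_alt]
  rw [pvBest_eq]
  by_cases hfwd : F.filter (fun item => decide (item.getD 1 0 ≤ md)) = []
  · rw [hfwd]
    simp
  · rw [if_neg hfwd]
    -- the sorted filtered forwards and the two parallel flatMaps
    have hpw := PySem.List.sorted_pairwise (F.filter (fun item => decide (item.getD 1 0 ≤ md)))
      (fun x => x.getD 1 0)
    rw [pvLoopA_eq md B _ [] hpw, List.nil_append]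
    -- membership characterisations
    have hmem_sums : ∀ s : Int,
        s ∈ (F.filter (fun item => decide (item.getD 1 0 ≤ md))).flatMap (fun f =>
          (B.filter (fun b => decide (b.getD 1 0 + f.getD 1 0 ≤ md))).map (fun b =>
            f.getD 1 0 + b.getD 1 0)) ↔
        ∃ f ∈ F.filter (fun item => decide (item.getD 1 0 ≤ md)), ∃ b ∈ B,
          b.getD 1 0 + f.getD 1 0 ≤ md ∧ s = f.getD 1 0 + b.getD 1 0 := by
      intro s
      simp [List.mem_flatMap, List.mem_map, List.mem_filter]
      tauto
    cases hbest : ((F.filter (fun item => decide (item.getD 1 0 ≤ md))).flatMap (fun f =>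
        (B.filter (fun b => decide (b.getD 1 0 + f.getD 1 0 ≤ md))).map (fun b =>
          f.getD 1 0 + b.getD 1 0))).foldl pvStep none with
    | none =>
      -- no admissible pair: A's combination list is empty, B returns []
      have hsums : ((F.filter (fun item => decide (item.getD 1 0 ≤ md))).flatMap (fun f =>
          (B.filter (fun b => decide (b.getD 1 0 + f.getD 1 0 ≤ md))).map (fun b =>
            f.getD 1 0 + b.getD 1 0))) = [] := ((pvStep_none_iff _ _).mp hbest).2
      rw [List.flatMap_eq_nil_iff] at hsums
      have hcombs : ((PySem.List.sorted (F.filter (fun item => decide (item.getD 1 0 ≤ md)))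
          (fun x => x.getD 1 0) false).flatMap (fun f =>
          (B.filter (fun b => decide (b.getD 1 0 + f.getD 1 0 ≤ md))).map (fun b =>
            [f.getD 0 0, b.getD 0 0, md - f.getD 1 0 - b.getD 1 0]))) = [] := by
        rw [List.flatMap_eq_nil_iff]
        intro f hf
        have hf' := (PySem.List.mem_sorted _ _ _ f).mp hf
        have := hsums f hf'
        rw [List.map_eq_nil_iff] at this ⊢
        exact this
      rw [hcombs]
      simp
    | some v =>
      -- v is the largest admissible pair sum
      obtain ⟨hv1, hv2, -⟩ := pvStep_some _ none v hbest
      have hv_mem : v ∈ _ := hv1.resolve_left (by simp)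
      rw [hmem_sums] at hv_mem
      obtain ⟨f0, hf0, b0, hb0, hle0, hv0⟩ := hv_mem
      have hvle : v ≤ md := by omega
      -- the combination list is nonempty; name the head of its sort
      have hcne : ((PySem.List.sorted (F.filter (fun item => decide (item.getD 1 0 ≤ md)))
          (fun x => x.getD 1 0) false).flatMap (fun f =>
          (B.filter (fun b => decide (b.getD 1 0 + f.getD 1 0 ≤ md))).map (fun b =>
            [f.getD 0 0, b.getD 0 0, md - f.getD 1 0 - b.getD 1 0]))) ≠ [] := by
        rw [Ne, List.flatMap_eq_nil_iff]
        intro hall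
        have := hall f0 ((PySem.List.mem_sorted _ _ _ f0).mpr hf0)
        rw [List.map_eq_nil_iff, List.filter_eq_nil_iff] at this
        exact this b0 hb0 (by simpa using hle0)
      have hsne : PySem.List.sorted ((PySem.List.sorted (F.filter (fun item => decide (item.getD 1 0 ≤ md)))
          (fun x => x.getD 1 0) false).flatMap (fun f =>
          (B.filter (fun b => decide (b.getD 1 0 + f.getD 1 0 ≤ md))).map (fun b =>
            [f.getD 0 0, b.getD 0 0, md - f.getD 1 0 - b.getD 1 0]))) (fun x => x.getD 2 0) false ≠ [] := by
        rw [Ne, PySem.List.sorted_eq_nil_iff]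
        exact hcne
      obtain ⟨m, t, hsc⟩ := List.exists_cons_of_ne_nil hsne
      rw [if_neg (by rw [hsc]; simp)]
      -- every combination's slack key is md minus its pair sum; the head's is md - v
      have hmem_combs : ∀ c, c ∈ ((PySem.List.sorted (F.filter (fun item => decide (item.getD 1 0 ≤ md)))
          (fun x => x.getD 1 0) false).flatMap (fun f =>
          (B.filter (fun b => decide (b.getD 1 0 + f.getD 1 0 ≤ md))).map (fun b =>
            [f.getD 0 0, b.getD 0 0, md - f.getD 1 0 - b.getD 1 0]))) ↔
          ∃ f ∈ F.filter (fun item => decide (item.getD 1 0 ≤ md)), ∃ b ∈ B,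
            b.getD 1 0 + f.getD 1 0 ≤ md ∧ c = [f.getD 0 0, b.getD 0 0, md - f.getD 1 0 - b.getD 1 0] := by
        intro c
        simp [List.mem_flatMap, List.mem_map, List.mem_filter, PySem.List.mem_sorted]
        tauto
      have hr0 : m.getD 2 0 = md - v := by
        have hm : m ∈ _ := (PySem.List.mem_sorted _ _ _ m).mp (hsc ▸ List.mem_cons_self ..)
        rw [hmem_combs] at hm
        obtain ⟨f1, hf1, b1, hb1, hle1, hc1⟩ := hm
        have hs1 : f1.getD 1 0 + b1.getD 1 0 ∈ _ :=
          (hmem_sums _).mpr ⟨f1, hf1, b1, hb1, hle1, rfl⟩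
        have h1 := hv2 _ hs1
        have hkm : m.getD 2 0 = md - f1.getD 1 0 - b1.getD 1 0 := by rw [hc1]; rfl
        -- the witness pair for v gives a combination with key md - v
        have hcv : [f0.getD 0 0, b0.getD 0 0, md - f0.getD 1 0 - b0.getD 1 0] ∈ _ :=
          (hmem_combs _).mpr ⟨f0, hf0, b0, hb0, hle0, rfl⟩
        have h2 := PySem.List.key_head_sorted_le _ (fun x => x.getD 2 0) hsc _ hcv
        have h2' : m.getD 2 0 ≤ md - f0.getD 1 0 - b0.getD 1 0 := by simpa using h2
        omega
      rw [hsc, List.headD_cons, ← hsc, hr0]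
      -- A's output: filter the minimal-slack combinations in construction order
      rw [pvFilter_sorted (fun x : List Int => x.getD 2 0)
        (fun item : List Int => decide (item.getD 2 0 = md - v))]
      rw [PySem.List.sorted_eq_self_of_pairwise _ _ (by
        apply List.pairwise_of_forall_mem_list
        intro a ha b hb
        have ha' := (List.mem_filter.mp ha).2
        have hb' := (List.mem_filter.mp hb).2
        simp only [decide_eq_true_eq] at ha' hb'
        omega)]
      rw [List.filter_flatMap]
      -- push the filter into each backward scan: it selects exactly the pairs summing to v
      have hinner : ∀ f : List Int,
          ((B.filter (fun b => decide (b.getD 1 0 + f.getD 1 0 ≤ md))).map (fun b =>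
            [f.getD 0 0, b.getD 0 0, md - f.getD 1 0 - b.getD 1 0])).filter
              (fun item => decide (item.getD 2 0 = md - v)) =
          (B.filter (fun b => decide (f.getD 1 0 + b.getD 1 0 = v))).map (fun b =>
            [f.getD 0 0, b.getD 0 0, md - f.getD 1 0 - b.getD 1 0]) := by
        intro f
        rw [List.filter_map, List.filter_filter]
        congr 1
        apply List.filter_congr
        intro b _
        simp only [Function.comp_apply, List.getD_cons_succ, List.getD_cons_zero]
        rw [← Bool.decide_and]
        apply decide_eq_decide.mpr
        omega
      simp only [hinner]
      rw [List.map_flatMap]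
      -- B's side: merge the two forward filters, pull the winners filter out of the sort,
      -- and drop the filtered-out forwards, whose backward scan is empty
      have hq : (F.filter (fun f => decide (f.getD 1 0 ≤ md) &&
            PySem.Set.contains (PySem.Set.ofList (B.map (fun b => b.getD 1 0))) (v - f.getD 1 0))) =
          (F.filter (fun item => decide (item.getD 1 0 ≤ md))).filter
            (fun f => PySem.Set.contains (PySem.Set.ofList (B.map (fun b => b.getD 1 0))) (v - f.getD 1 0)) := by
        rw [List.filter_filter]
        apply List.filter_congr
        intro f _
        exact Bool.and_comm _ _
      conv_rhs => rw [hq, ← pvFilter_sorted (fun x : List Int => x.getD 1 0)]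
      rw [pvFlatMap_filter
        (fun f => PySem.Set.contains (PySem.Set.ofList (B.map (fun b => b.getD 1 0))) (v - f.getD 1 0))
        (fun f => (B.filter (fun b => decide (f.getD 1 0 + b.getD 1 0 = v))).map
          (fun b => [f.getD 0 0, b.getD 0 0]))
        (PySem.List.sorted (F.filter (fun item => decide (item.getD 1 0 ≤ md)))
          (fun x => x.getD 1 0) false)
        ?hdrop]
      case hdrop =>
        intro f _ hqf
        have hqf' : PySem.Set.contains (PySem.Set.ofList (B.map (fun b => b.getD 1 0)))
            (v - f.getD 1 0) = false := hqf
        have hnotin : v - f.getD 1 0 ∉ B.map (fun b => b.getD 1 0) := by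
          intro hmem
          rw [← PySem.Set.mem_ofList] at hmem
          have hc := (PySem.Set.contains_iff _ _).mpr hmem
          rw [hqf'] at hc
          exact Bool.false_ne_true hc
        have hfil : B.filter (fun b => decide (f.getD 1 0 + b.getD 1 0 = v)) = [] := by
          rw [List.filter_eq_nil_iff]
          intro b hb hsum
          apply hnotin
          simp only [List.mem_map]
          refine ⟨b, hb, ?_⟩
          simp only [decide_eq_true_eq] at hsum
          omega
        show (B.filter (fun b => decide (f.getD 1 0 + b.getD 1 0 = v))).map
          (fun b => [f.getD 0 0, b.getD 0 0]) = []
        rw [hfil]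
        rfl
      simp only [List.map_map]
      rfl

-- ===== VERDICT (by name: the statement is the Claim_ definition above) =====
theorem simple_main_spec : Claim_equal_simple_main := by
  intro md F B _ _
  unfold Spec_simple_main
  exact pv_main md F B
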